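-- pv_equiv track=rewrite | github.com/vdhugn/8firstweeks.Project1 | Project 1/appearanceCheck.py | check
-- ===== SOURCE A (Python) =====
-- def check(A, n):
--   res = [0] * n
--   seen = set()
--   for i in range(n):
--     if A[i] in seen:
--       res[i] = 1
--     else:
--       seen.add(A[i])
--   return res
-- ===== SOURCE B (Python) =====
-- def check(A, n):
--   first_seen = {}
--   for i in range(n):
--     if A[i] not in first_seen:
--       first_seen[A[i]] = i
--   return [0 if first_seen[A[i]] == i else 1 for i in range(n)]
-- ===== Notes on version B (the rewrite author's own statement) =====
-- stated objective: alternative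
-- what changed: Replaces the incremental seen-set loop that mutates a preallocated result array with a two-pass table-then-map scheme: first build a dict mapping each value to its earliest index, then emit 0/1 by comparing each index with that first occurrence.
import Mathlib
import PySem

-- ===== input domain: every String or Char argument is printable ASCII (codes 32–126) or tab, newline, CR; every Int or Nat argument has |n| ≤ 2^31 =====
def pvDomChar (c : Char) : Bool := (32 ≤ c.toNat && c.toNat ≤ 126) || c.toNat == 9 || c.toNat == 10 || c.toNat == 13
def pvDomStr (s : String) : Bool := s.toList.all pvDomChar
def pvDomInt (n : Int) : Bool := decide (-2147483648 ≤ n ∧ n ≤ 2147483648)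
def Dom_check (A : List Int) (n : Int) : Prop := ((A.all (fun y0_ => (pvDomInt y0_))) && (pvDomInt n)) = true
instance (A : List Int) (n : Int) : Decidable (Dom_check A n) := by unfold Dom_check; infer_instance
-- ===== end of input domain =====

-- B replaces A's single incremental pass (mutable seen-set + in-place marking of a preallocated
-- result list) with a two-pass table-then-map scheme: build a first-occurrence-index dict, then
-- map each index to 0/1 by comparing with that table. Same cost class; objective: alternative.

-- ===== PORT A =====
def check (A : List Int) (n : Int) : List Int :=
  -- res = [0] * n ; seen = set(); for i in range(n): …
  let p := (PySem.List.pyRange 0 n 1).foldl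
    (fun (st : List Int × PySem.Set Int) i =>
      if st.2.contains (PySem.List.pyGetD A i 0) then
        (PySem.List.pySetD st.1 i 1, st.2)          -- res[i] = 1
      else
        (st.1, st.2.add (PySem.List.pyGetD A i 0))) -- seen.add(A[i])
    (List.replicate n.toNat 0, PySem.Set.empty)
  p.1

-- ===== PORT B =====
def check_alt (A : List Int) (n : Int) : List Int :=
  -- first pass: first_seen[A[i]] = i on first sight only
  let first_seen : PySem.Dict Int Int := (PySem.List.pyRange 0 n 1).foldl
    (fun d i =>
      if d.contains (PySem.List.pyGetD A i 0) then d
      else d.insert (PySem.List.pyGetD A i 0) i)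
    PySem.Dict.empty
  -- second pass: 0 iff this index is the first occurrence
  -- (getD is the total form of first_seen[A[i]]; under Pre_check the key is always present)
  (PySem.List.pyRange 0 n 1).map
    (fun i => if first_seen.getD (PySem.List.pyGetD A i 0) 0 = i then 0 else 1)

-- ===== PRECONDITION & SPEC =====
-- Pre_check: Python A raises IndexError as soon as n > len(A); it returns normally for every
-- n ≤ len(A) (including negative n, where it returns []).
def Pre_check (A : List Int) (n : Int) : Prop := n ≤ (A.length : Int)
instance (A : List Int) (n : Int) : Decidable (Pre_check A n) := by unfold Pre_check; infer_instance
def pvWitness_check : List Int × Int := ([2, 7, 2, 7, 5], 5)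

def Spec_check (A : List Int) (n : Int) (out : List Int) : Prop := out = check_alt A n
instance (A : List Int) (n : Int) (out : List Int) : Decidable (Spec_check A n out) := by unfold Spec_check; infer_instance

-- ===== CLAIM (what is proved, stated in full; the proofs are below) =====
def Claim_equal_check : Prop := ∀ (A : List Int) (n : Int), Dom_check A n → Pre_check A n → Spec_check A n (check A n)

-- ===== LEMMAS AND PROOFS =====

-- value fetched at nat index j (total form, as both ports use it)
def pvv (A : List Int) (j : Nat) : Int := PySem.List.pyGetD A (j : Nat) 0

-- the common reference result: entry j is 1 iff A[j] occurred among A[0..j-1]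
def pvSpecList (A : List Int) (n0 : Nat) : List Int :=
  (List.range n0).map (fun j => if pvv A j ∈ (List.range j).map (pvv A) then 1 else 0)

-- A's result array after the first k iterations
def pvResAt (A : List Int) (n0 k : Nat) : List Int :=
  (List.range n0).map (fun j => if j < k ∧ pvv A j ∈ (List.range j).map (pvv A) then 1 else 0)

theorem pvResAt_zero (A : List Int) (n0 : Nat) : pvResAt A n0 0 = List.replicate n0 0 := by
  unfold pvResAt
  apply List.ext_getElem <;> simp

theorem pvResAt_succ (A : List Int) (n0 k : Nat) (hk : k < n0) :
    pvResAt A n0 (k+1) =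
      if pvv A k ∈ (List.range k).map (pvv A) then (pvResAt A n0 k).set k 1 else pvResAt A n0 k := by
  unfold pvResAt
  split_ifs with hm
  · apply List.ext_getElem
    · simp
    · intro j h1 h2
      simp only [List.getElem_map, List.getElem_range, List.getElem_set]
      simp only [List.length_map, List.length_range] at h1
      by_cases hj : j = k
      · subst hj; simp [hm]
      · simp only [if_neg (show ¬ k = j from fun h => hj h.symm)]
        congr 1
        simp only [eq_iff_iff]
        constructor
        · rintro ⟨h, hmem⟩; exact ⟨by omega, hmem⟩
        · rintro ⟨h, hmem⟩; exact ⟨by omega, hmem⟩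
  · apply List.ext_getElem
    · simp
    · intro j h1 h2
      simp only [List.getElem_map, List.getElem_range]
      congr 1
      simp only [eq_iff_iff]
      constructor
      · rintro ⟨h, hmem⟩
        refine ⟨?_, hmem⟩
        rcases Nat.lt_succ_iff_lt_or_eq.mp h with h' | h'
        · exact h'
        · subst h'; exact absurd hmem hm
      · rintro ⟨h, hmem⟩; exact ⟨by omega, hmem⟩

theorem pvResAt_spec (A : List Int) (n0 : Nat) : pvResAt A n0 n0 = pvSpecList A n0 := by
  unfold pvResAt pvSpecList
  apply List.ext_getElem
  · simp
  · intro j h1 h2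
    simp only [List.getElem_map, List.getElem_range]
    simp only [List.length_map, List.length_range] at h1
    congr 1
    simp only [eq_iff_iff]
    exact ⟨fun h => h.2, fun h => ⟨h1, h⟩⟩

theorem check_loop (A : List Int) (n0 : Nat) : ∀ k, k ≤ n0 →
    (PySem.List.pyRange 0 (k : Int) 1).foldl
      (fun (st : List Int × PySem.Set Int) i =>
        if st.2.contains (PySem.List.pyGetD A i 0) then
          (PySem.List.pySetD st.1 i 1, st.2)
        else
          (st.1, st.2.add (PySem.List.pyGetD A i 0)))
      (List.replicate n0 0, PySem.Set.empty)
    = (pvResAt A n0 k, PySem.Set.ofList ((List.range k).map (pvv A))) := by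
  intro k
  induction k with
  | zero =>
    intro _
    rw [PySem.List.pyRange_one_eq_nil (by norm_num)]
    simp [pvResAt_zero, PySem.Set.empty]
  | succ k ih =>
    intro hk
    have hk' : k ≤ n0 := by omega
    have hcast : ((k+1 : Nat) : Int) = (k : Int) + 1 := by push_cast; ring
    rw [hcast, PySem.List.pyRange_one_succ_right (by positivity), List.foldl_append, ih hk']
    simp only [List.foldl_cons, List.foldl_nil]
    have hv : PySem.List.pyGetD A ((k : Nat) : Int) 0 = pvv A k := rfl
    by_cases hm : pvv A k ∈ (List.range k).map (pvv A)
    · rw [if_pos (by rw [hv]; exact (PySem.Set.contains_iff _ _).mpr ((PySem.Set.mem_ofList _ _).mpr hm))]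
      have hset : PySem.Set.ofList ((List.range (k+1)).map (pvv A)) = PySem.Set.ofList ((List.range k).map (pvv A)) := by
        rw [List.range_succ, List.map_append, List.map_singleton,
            PySem.Set.ofList_eq_foldl, List.foldl_append, ← PySem.Set.ofList_eq_foldl]
        simp only [List.foldl_cons, List.foldl_nil]
        show PySem.Set.add _ _ = _
        unfold PySem.Set.add
        rw [if_pos ((PySem.Set.contains_iff _ _).mpr ((PySem.Set.mem_ofList _ _).mpr hm))]
      rw [hset, pvResAt_succ A n0 k (by omega), if_pos hm]
      simp [PySem.List.pySetD_natCast]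
    · have hc : ¬ ((PySem.Set.ofList ((List.range k).map (pvv A))).contains (pvv A k) = true) := by
        rw [PySem.Set.contains_iff, PySem.Set.mem_ofList]; exact hm
      rw [hv, if_neg hc]
      have hset : PySem.Set.ofList ((List.range (k+1)).map (pvv A)) = (PySem.Set.ofList ((List.range k).map (pvv A))).add (pvv A k) := by
        rw [List.range_succ, List.map_append, List.map_singleton,
            PySem.Set.ofList_eq_foldl, List.foldl_append, ← PySem.Set.ofList_eq_foldl]
        simp [List.foldl_cons, List.foldl_nil]
      rw [hset, pvResAt_succ A n0 k (by omega), if_neg hm]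

theorem check_eq_spec (A : List Int) (n : Int) : check A n = pvSpecList A n.toNat := by
  unfold check
  by_cases h : 0 ≤ n
  · have hn : n = ((n.toNat : Nat) : Int) := (Int.toNat_of_nonneg h).symm
    rw [hn]
    simp only [Int.toNat_natCast]
    rw [check_loop A n.toNat n.toNat le_rfl]
    exact pvResAt_spec A n.toNat
  · have hn0 : n.toNat = 0 := Int.toNat_of_nonpos (by omega)
    rw [PySem.List.pyRange_one_eq_nil (by omega)]
    simp [pvSpecList, hn0]

theorem alt_dict (A : List Int) (n0 : Nat) (a : Int) :
    ((PySem.List.pyRange 0 (n0 : Int) 1).foldl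
      (fun d i =>
        if d.contains (PySem.List.pyGetD A i 0) then d
        else d.insert (PySem.List.pyGetD A i 0) i)
      PySem.Dict.empty).get? a
    = ((List.range n0).find? (fun j => pvv A j == a)).map (fun j => (j : Int)) := by
  induction n0 with
  | zero => rw [PySem.List.pyRange_one_eq_nil (by norm_num)]; simp
  | succ k ih =>
    have hcast : ((k+1 : Nat) : Int) = (k : Int) + 1 := by push_cast; ring
    rw [hcast, PySem.List.pyRange_one_succ_right (by positivity), List.foldl_append,
        List.range_succ, List.find?_append]
    simp only [List.foldl_cons, List.foldl_nil]
    have hv : PySem.List.pyGetD A ((k : Nat) : Int) 0 = pvv A k := rfl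
    set d := (PySem.List.pyRange 0 (k : Int) 1).foldl
      (fun d i =>
        if d.contains (PySem.List.pyGetD A i 0) then d
        else d.insert (PySem.List.pyGetD A i 0) i)
      PySem.Dict.empty with hd
    by_cases hc : d.contains (pvv A k) = true
    · rw [hv, if_pos hc, ih]
      rcases hfk : (List.range k).find? (fun j => pvv A j == a) with _ | j
      · have hka : ¬ (pvv A k == a) = true := by
          intro hEq
          have := (PySem.Dict.contains_eq_isSome_get? d (pvv A k)) ▸ hc
          rw [show pvv A k = a from by simpa using hEq] at this
          rw [ih, hfk] at this
          simp at this
        simp [List.find?, hka]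
      · simp
    · rw [hv, if_neg hc]
      rw [PySem.Dict.get?_insert, ih]
      rcases hfk : (List.range k).find? (fun j => pvv A j == a) with _ | j
      · by_cases hka : a = pvv A k
        · subst hka
          simp [List.find?]
        · rw [if_neg hka]
          have hne2 : (pvv A k == a) = false := beq_false_of_ne (fun h => hka h.symm)
          simp [List.find?, hne2]
      · have hne : a ≠ pvv A k := by
          intro hEq
          apply hc
          rw [PySem.Dict.contains_eq_isSome_get?, ← hEq, ih, hfk]
          rfl
        rw [if_neg hne]
        simp

theorem alt_find (A : List Int) (n0 j : Nat) (hj : j < n0) :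
    ((List.range n0).find? (fun j' => pvv A j' == pvv A j)).map (fun j' => (j' : Int))
    = if pvv A j ∈ (List.range j).map (pvv A) then
        ((List.range j).find? (fun j' => pvv A j' == pvv A j)).map (fun j' => (j' : Int))
      else some (j : Int) := by
  have hsplit : List.range n0 = List.range (j+1) ++ (List.range (n0 - (j+1))).map ((j+1) + ·) := by
    rw [← List.range_add]; congr 1; omega
  rw [hsplit, List.find?_append, List.range_succ, List.find?_append]
  by_cases hm : pvv A j ∈ (List.range j).map (pvv A)
  · rw [if_pos hm]
    obtain ⟨j', hj', hvj⟩ := List.mem_map.mp hm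
    have hsome : ((List.range j).find? (fun j' => pvv A j' == pvv A j)).isSome := by
      rw [List.find?_isSome]
      exact ⟨j', hj', by simp [hvj]⟩
    rcases hres : (List.range j).find? (fun j' => pvv A j' == pvv A j) with _ | j''
    · rw [hres] at hsome; exact absurd hsome (by simp)
    · simp
  · rw [if_neg hm]
    have hnone : (List.range j).find? (fun j' => pvv A j' == pvv A j) = none := by
      rw [List.find?_eq_none]
      intro j' hj' hEq
      exact hm (List.mem_map.mpr ⟨j', hj', by simpa using hEq⟩)
    rw [hnone]
    simp

theorem alt_eq_spec (A : List Int) (n : Int) : check_alt A n = pvSpecList A n.toNat := by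
  unfold check_alt
  by_cases h : 0 ≤ n
  · have hn : n = ((n.toNat : Nat) : Int) := (Int.toNat_of_nonneg h).symm
    rw [hn]
    set n0 := n.toNat with hn0
    set d := (PySem.List.pyRange 0 ((n0 : Nat) : Int) 1).foldl
      (fun d i =>
        if d.contains (PySem.List.pyGetD A i 0) then d
        else d.insert (PySem.List.pyGetD A i 0) i)
      PySem.Dict.empty with hd
    rw [PySem.List.pyRange_one]
    simp only [sub_zero, Int.toNat_natCast, List.map_map]
    unfold pvSpecList
    apply List.map_congr_left
    intro j hj
    have hjlt : j < n0 := List.mem_range.mp hj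
    simp only [Function.comp_apply, zero_add]
    have hv : PySem.List.pyGetD A ((j : Nat) : Int) 0 = pvv A j := rfl
    rw [hv, PySem.Dict.getD_eq_get?_getD, hd, alt_dict A n0 (pvv A j), alt_find A n0 j hjlt]
    by_cases hm : pvv A j ∈ (List.range j).map (pvv A)
    · rw [if_pos hm, if_pos hm]
      obtain ⟨j', hj', hvj⟩ := List.mem_map.mp hm
      have hsome : ((List.range j).find? (fun j' => pvv A j' == pvv A j)).isSome := by
        rw [List.find?_isSome]; exact ⟨j', hj', by simp [hvj]⟩
      rcases hres : (List.range j).find? (fun j' => pvv A j' == pvv A j) with _ | j''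
      · rw [hres] at hsome; simp at hsome
      · have hj'' : j'' < j := List.mem_range.mp (List.mem_of_find?_eq_some hres)
        have : ¬ ((j'' : Int) = (j : Int)) := by exact_mod_cast (by omega : ¬ j'' = j)
        simp [this]
    · rw [if_neg hm, if_neg hm]
      simp
  · have hn0 : n.toNat = 0 := Int.toNat_of_nonpos (by omega)
    rw [PySem.List.pyRange_one_eq_nil (by omega)]
    simp [pvSpecList, hn0]

-- ===== VERDICT (by name: the statement is the Claim_ definition above) =====
theorem check_spec : Claim_equal_check := by
  intro A n _ _
  unfold Spec_check
  rw [check_eq_spec, alt_eq_spec]
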